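-- pv_equiv track=rewrite | github.com/need4spd/eulerproject | need4spd/euler_42.py | isTriangeNumber
-- ===== SOURCE A (Python) =====
-- import math
--
-- def isTriangeNumber(n):
--
--   temp_n = n * 2
--
--   start_num = int(math.sqrt(temp_n)) - 1
--
--   while True:
--     s = start_num**2 + start_num
--     if temp_n == s:
--       return True
--
--     if temp_n < s:
--       return False
--
--     start_num += 1
-- ===== SOURCE B (Python) =====
-- import math
--
-- def isTriangeNumber(n):
--     # n is triangular iff 8n+1 is an odd perfect square: closed-form test, no loop.
--     m = 8 * n + 1
--     r = math.isqrt(m)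
--     return r * r == m
-- ===== Notes on version B (the rewrite author's own statement) =====
-- stated objective: simpler
-- what changed: Replaces the upward scan from int(sqrt(2n))-1 with the closed-form perfect-square test isqrt(8n+1)**2 == 8n+1 (n triangular iff 8n+1 is a perfect square); no loop at all.
import Mathlib
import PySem

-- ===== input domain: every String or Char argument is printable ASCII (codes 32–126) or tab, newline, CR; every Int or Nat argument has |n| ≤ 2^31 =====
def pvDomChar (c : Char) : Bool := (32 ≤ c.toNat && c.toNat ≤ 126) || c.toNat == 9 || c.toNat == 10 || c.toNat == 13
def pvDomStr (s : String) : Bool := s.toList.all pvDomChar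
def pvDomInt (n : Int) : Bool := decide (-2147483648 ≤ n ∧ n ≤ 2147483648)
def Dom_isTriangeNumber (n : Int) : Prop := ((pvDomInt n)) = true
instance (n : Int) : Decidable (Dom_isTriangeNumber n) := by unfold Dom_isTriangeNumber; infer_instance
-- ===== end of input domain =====

-- B replaces A's upward scan from int(sqrt(2n))-1 with the closed-form test "8n+1 is a perfect square"; objective: simpler.


-- ===== PORT A =====
-- the 'while True' loop: s = start**2 + start (inlined); return True if temp_n == s,
-- False if temp_n < s, else start += 1
def isTriangeNumberLoop (t start : Int) : Bool :=
  if t = start * start + start then true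
  else if t < start * start + start then false
  else isTriangeNumberLoop t (start + 1)
termination_by (t - start).toNat
decreasing_by
  have hsq : 0 ≤ start * start := mul_self_nonneg start
  omega

-- int(math.sqrt(temp_n)) ported as Nat.sqrt: exact on Dom with n ≥ 0 (for t = 2n ≤ 2^32 the
-- float sqrt's error is far too small to move the truncation off the integer sqrt);
-- math.sqrt raises ValueError for t < 0, which Pre_ excludes.
def isTriangeNumber (n : Int) : Bool :=
  let temp_n := n * 2
  let start_num := ((Nat.sqrt temp_n.toNat : ℕ) : Int) - 1
  isTriangeNumberLoop temp_n start_num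

-- ===== PORT B =====
-- math.isqrt(m) ported as Nat.sqrt (isqrt raises for m < 0, excluded by Pre_)
def isTriangeNumber_alt (n : Int) : Bool :=
  let m := 8 * n + 1
  let r := ((Nat.sqrt m.toNat : ℕ) : Int)
  r * r == m

-- ===== PRECONDITION & SPEC =====
-- A (math.sqrt) and B (math.isqrt) both raise ValueError on n < 0
def Pre_isTriangeNumber (n : Int) : Prop := 0 ≤ n
instance (n : Int) : Decidable (Pre_isTriangeNumber n) := by unfold Pre_isTriangeNumber; infer_instance
def pvWitness_isTriangeNumber : Int := 10

def Spec_isTriangeNumber (n : Int) (out : Bool) : Prop := out = isTriangeNumber_alt n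
instance (n : Int) (out : Bool) : Decidable (Spec_isTriangeNumber n out) := by unfold Spec_isTriangeNumber; infer_instance

-- ===== CLAIM (what is proved, stated in full; the proofs are below) =====
def Claim_equal_isTriangeNumber : Prop := ∀ (n : Int), Dom_isTriangeNumber n → Pre_isTriangeNumber n → Spec_isTriangeNumber n (isTriangeNumber n)

-- ===== LEMMAS AND PROOFS =====

-- characterisation of A's loop, valid from any starting point ≥ -1
lemma loop_iff (t : Int) : ∀ start : Int, -1 ≤ start →
    (isTriangeNumberLoop t start = true ↔ ∃ k : Int, start ≤ k ∧ k * k + k = t) := by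
  intro start
  induction start using isTriangeNumberLoop.induct t with
  | case1 x hx =>
    intro _
    rw [isTriangeNumberLoop, if_pos hx]
    exact ⟨fun _ => ⟨x, le_refl _, hx.symm⟩, fun _ => rfl⟩
  | case2 x hne hlt =>
    intro hs
    rw [isTriangeNumberLoop, if_neg hne, if_pos hlt]
    constructor
    · intro h; exact absurd h (by simp)
    · rintro ⟨k, hk, hkt⟩
      exfalso
      rcases eq_or_lt_of_le hk with hk1 | hk1
      · rw [← hk1] at hkt; omega
      · have hk0 : 0 ≤ k := by omega
        nlinarith
  | case3 x hne hge ih =>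
    intro hs
    rw [isTriangeNumberLoop, if_neg hne, if_neg hge]
    rw [ih (by omega)]
    constructor
    · rintro ⟨k, hk, hkt⟩; exact ⟨k, by omega, hkt⟩
    · rintro ⟨k, hk, hkt⟩
      refine ⟨k, ?_, hkt⟩
      rcases eq_or_lt_of_le hk with hk1 | hk1
      · rw [← hk1] at hkt; exact absurd hkt.symm hne
      · omega

-- n is triangular iff 8n+1 is a perfect square (and then Nat.sqrt recovers the root)
lemma triangular_iff_square (n : Int) (hn : 0 ≤ n) :
    (∃ j : Int, 0 ≤ j ∧ j * j + j = n * 2) ↔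
      ((Nat.sqrt (8 * n + 1).toNat : Int) * (Nat.sqrt (8 * n + 1).toNat : Int) = 8 * n + 1) := by
  constructor
  · rintro ⟨j, hj0, hjt⟩
    set J := j.toNat with hJ
    have hJj : (J : Int) = j := Int.toNat_of_nonneg hj0
    have hS : ((J * J : ℕ) : Int) = j * j := by push_cast [hJj]; ring
    have hm' : (8 * n + 1).toNat = (2 * J + 1) ^ 2 := by
      have hexp : (2 * J + 1) ^ 2 = 4 * (J * J) + 4 * J + 1 := by ring
      omega
    have hsq : Nat.sqrt ((8 * n + 1).toNat) = 2 * J + 1 := by rw [hm']; exact Nat.sqrt_eq' _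
    rw [hsq]
    have hcast : (((2 * J + 1) ^ 2 : ℕ) : Int) = 8 * n + 1 := by omega
    push_cast at hcast ⊢
    nlinarith
  · intro h
    set r := Nat.sqrt (8 * n + 1).toNat with hr
    have hrr : ((r * r : ℕ) : Int) = 8 * n + 1 := by push_cast; exact h
    set N := n.toNat with hN
    have hNn : (N : Int) = n := Int.toNat_of_nonneg hn
    have hrrN : r * r = 8 * N + 1 := by omega
    obtain ⟨j, hj⟩ : ∃ j : ℕ, r = 2 * j + 1 := by
      rcases Nat.even_or_odd r with ⟨c, hc⟩ | ⟨j, hj⟩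
      · exfalso
        have hcc : (c + c) * (c + c) = 4 * (c * c) := by ring
        rw [hc, hcc] at hrrN
        omega
      · exact ⟨j, hj⟩
    have hexp : (2 * j + 1) * (2 * j + 1) = 4 * (j * j) + 4 * j + 1 := by ring
    rw [hj, hexp] at hrrN
    have hjt : j * j + j = 2 * N := by omega
    refine ⟨(j : Int), by positivity, ?_⟩
    have hc2 : ((j * j + j : ℕ) : Int) = ((2 * N : ℕ) : Int) := by exact_mod_cast congrArg (Nat.cast (R := Int)) hjt
    push_cast [hNn] at hc2
    linarith

-- ===== VERDICT (by name: the statement is the Claim_ definition above) =====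
theorem isTriangeNumber_spec : Claim_equal_isTriangeNumber := by
  intro n _ hn
  have hn' : (0:Int) ≤ n := hn
  unfold Spec_isTriangeNumber isTriangeNumber isTriangeNumber_alt
  simp only
  set t := n * 2 with ht
  set start := ((Nat.sqrt t.toNat : ℕ) : Int) - 1 with hstart
  have hs1 : -1 ≤ start := by
    have : (0:Int) ≤ ((Nat.sqrt t.toNat : ℕ) : Int) := Int.natCast_nonneg _
    omega
  by_cases hB : ((Nat.sqrt (8 * n + 1).toNat : ℕ) : Int) * ((Nat.sqrt (8 * n + 1).toNat : ℕ) : Int) = 8 * n + 1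
  · rw [show (((Nat.sqrt (8 * n + 1).toNat : ℕ) : Int) * ((Nat.sqrt (8 * n + 1).toNat : ℕ) : Int) == 8 * n + 1) = true from beq_iff_eq.mpr hB]
    rw [loop_iff t start hs1]
    obtain ⟨j, hj0, hjt⟩ := (triangular_iff_square n hn').mpr hB
    refine ⟨j, ?_, hjt⟩
    set J := j.toNat with hJ
    have hJj : (J : Int) = j := Int.toNat_of_nonneg hj0
    have hS : ((J * J : ℕ) : Int) = j * j := by push_cast [hJj]; ring
    have hexp : (J + 1) ^ 2 = J * J + 2 * J + 1 := by ring
    have hlt : t.toNat < (J + 1) ^ 2 := by omega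
    have := Nat.sqrt_lt'.mpr hlt
    omega
  · rw [show (((Nat.sqrt (8 * n + 1).toNat : ℕ) : Int) * ((Nat.sqrt (8 * n + 1).toNat : ℕ) : Int) == 8 * n + 1) = false from beq_eq_false_iff_ne.mpr hB]
    rw [← Bool.not_eq_true]
    rw [loop_iff t start hs1]
    rintro ⟨k, hk, hkt⟩
    apply hB
    apply (triangular_iff_square n hn').mp
    by_cases hk0 : 0 ≤ k
    · exact ⟨k, hk0, hkt⟩
    · exact ⟨-1 - k, by omega, by nlinarith⟩
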